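-- pv_equiv track=rewrite | github.com/harshvardhanraju/BDD-ADAS-Analysis | src/evaluation/analysis/failure_analyzer.py | _analyze_contextual_patterns
-- ===== SOURCE A (Python) =====
-- from typing import Dict, List, Tuple, Optional, Set
-- from collections import defaultdict, Counter
--
-- def _analyze_contextual_patterns(results: Dict, metadata_by_image: Dict) -> Dict:
--     """Analyze failure patterns by environmental context."""
--     contextual_failures = {}
--
--     if not metadata_by_image:
--         return contextual_failures
--
--     # Group failures by weather/lighting/scene
--     context_keys = ['weather', 'timeofday', 'scene']
--
--     for context_key in context_keys:
--         context_failures = defaultdict(lambda: defaultdict(int))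
--
--         for failure_type, cases in results['failure_cases'].items():
--             for case in cases:
--                 metadata = case.get('metadata', {})
--                 context_value = metadata.get(context_key, 'unknown')
--                 context_failures[context_value][failure_type] += 1
--
--         if context_failures:
--             contextual_failures[context_key] = dict(context_failures)
--
--     return contextual_failures
-- ===== SOURCE B (Python) =====
-- from collections import Counter
--
--
-- def _analyze_contextual_patterns(results, metadata_by_image):
--     """Analyze failure patterns by environmental context.
--
--     Different strategy: flatten all failures into a flat multiset of
--     (context_key, context_value, failure_type) triples, count it once with
--     Counter, then regroup the flat counts into the nested dict shape.
--     """
--     if not metadata_by_image: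
--         return {}
--
--     context_keys = ['weather', 'timeofday', 'scene']
--     counts = Counter(
--         (ck, case.get('metadata', {}).get(ck, 'unknown'), ft)
--         for ft, cases in results['failure_cases'].items()
--         for case in cases
--         for ck in context_keys
--     )
--
--     grouped = {}
--     for (ck, cv, ft), n in counts.items():
--         grouped.setdefault(ck, {}).setdefault(cv, {})[ft] = n
--
--     return {ck: grouped[ck] for ck in context_keys if ck in grouped}
-- ===== Notes on version B (the rewrite author's own statement) =====
-- stated objective: alternative
-- what changed: Instead of incrementing nested defaultdicts during three scans keyed by context, B flattens all failure cases into a flat multiset of (context_key, context_value, failure_type) triples, counts it once with a Counter, and then regroups the flat counts into the nested dict shape in a separate pass.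
import Mathlib
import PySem

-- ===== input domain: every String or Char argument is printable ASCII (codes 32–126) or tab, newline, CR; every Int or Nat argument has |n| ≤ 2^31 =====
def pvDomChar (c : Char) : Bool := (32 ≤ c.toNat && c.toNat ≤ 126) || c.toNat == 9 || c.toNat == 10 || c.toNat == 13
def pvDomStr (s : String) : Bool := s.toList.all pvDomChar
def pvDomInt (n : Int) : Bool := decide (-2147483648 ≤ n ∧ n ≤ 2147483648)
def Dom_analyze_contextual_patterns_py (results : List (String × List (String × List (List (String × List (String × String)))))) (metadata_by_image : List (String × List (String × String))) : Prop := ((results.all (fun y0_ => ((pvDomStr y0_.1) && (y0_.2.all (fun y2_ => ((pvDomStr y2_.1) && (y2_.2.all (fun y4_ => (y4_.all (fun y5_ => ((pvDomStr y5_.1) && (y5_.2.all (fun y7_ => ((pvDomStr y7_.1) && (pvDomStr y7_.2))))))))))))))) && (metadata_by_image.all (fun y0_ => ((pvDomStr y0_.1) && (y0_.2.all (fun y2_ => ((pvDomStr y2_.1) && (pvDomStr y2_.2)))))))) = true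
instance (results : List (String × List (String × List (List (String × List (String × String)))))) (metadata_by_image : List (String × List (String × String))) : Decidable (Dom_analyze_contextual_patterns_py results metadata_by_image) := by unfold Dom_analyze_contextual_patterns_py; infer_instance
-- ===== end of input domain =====

-- A counts into nested per-context defaultdicts during three scans of the failure cases;
-- B instead flattens everything into one flat multiset of (context_key, context_value,
-- failure_type) triples, counts it once with Counter, and regroups the flat counts
-- (objective: alternative algorithm, same asymptotic cost).

-- ===== PORT A =====
-- case.get('metadata', {}) seen as a dict (both Pythons read it this way)
def pvMeta (case_ : List (String × List (String × String))) : PySem.Dict String String :=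
  PySem.Dict.ofList (((PySem.Dict.ofList case_).get? "metadata").getD [])

-- context_failures[context_value][failure_type] += 1 for one case (A's inner loop body)
def pvCount (ckey : String) (cf : PySem.Dict String (PySem.Dict String Int)) (ft : String)
    (case_ : List (String × List (String × String))) : PySem.Dict String (PySem.Dict String Int) :=
  let metadata := pvMeta case_
  let cval := metadata.getD ckey "unknown"
  cf.modify cval PySem.Dict.empty (fun inner => inner.modify ft 0 (· + 1))

-- A's two nested loops over results['failure_cases'] for one context key
def pvRunKey (ckey : String) (fc : List (String × List (List (String × List (String × String))))) :
    PySem.Dict String (PySem.Dict String Int) :=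
  fc.foldl (fun cf p => p.2.foldl (fun cf c => pvCount ckey cf p.1 c) cf) PySem.Dict.empty

-- a nested dict rendered as the output association list (dict(context_failures) / grouped[ck])
def pvDictOut (cf : PySem.Dict String (PySem.Dict String Int)) : List (String × List (String × Int)) :=
  cf.items.map (fun q => (q.1, q.2.items))

def analyze_contextual_patterns_py (results : List (String × List (String × List (List (String × List (String × String)))))) (metadata_by_image : List (String × List (String × String))) : List (String × List (String × List (String × Int))) :=
  if metadata_by_image.isEmpty then []
  else
    -- results['failure_cases'] (Pre_ guarantees the key is present; KeyError otherwise)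
    let fc := (PySem.Dict.ofList ((PySem.Dict.ofList results).getD "failure_cases" [])).items
    ["weather", "timeofday", "scene"].foldl (fun acc ckey =>
      let cf := pvRunKey ckey fc
      if cf.items.isEmpty then acc else acc ++ [(ckey, pvDictOut cf)]) []

-- ===== PORT B =====
-- the flat multiset of (context_key, context_value, failure_type) triples (B's generator)
def pvTriples (fc : List (String × List (List (String × List (String × String))))) :
    List (String × String × String) :=
  fc.flatMap (fun p => p.2.flatMap (fun c =>
    ["weather", "timeofday", "scene"].map (fun ck => (ck, (pvMeta c).getD ck "unknown", p.1))))

-- grouped.setdefault(ck, {}).setdefault(cv, {})[ft] = n  for one counted triple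
def pvGroupStep (g : PySem.Dict String (PySem.Dict String (PySem.Dict String Int)))
    (q : (String × String × String) × Int) :
    PySem.Dict String (PySem.Dict String (PySem.Dict String Int)) :=
  g.modify q.1.1 PySem.Dict.empty (fun m =>
    m.modify q.1.2.1 PySem.Dict.empty (fun i => i.insert q.1.2.2 q.2))

def analyze_contextual_patterns_py_alt (results : List (String × List (String × List (List (String × List (String × String)))))) (metadata_by_image : List (String × List (String × String))) : List (String × List (String × List (String × Int))) :=
  if metadata_by_image.isEmpty then []
  else
    let fc := (PySem.Dict.ofList ((PySem.Dict.ofList results).getD "failure_cases" [])).items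
    -- counts = Counter(triples)
    let counts := PySem.Dict.counter (pvTriples fc)
    -- regroup the flat counts into the nested shape
    let grouped := counts.items.foldl pvGroupStep PySem.Dict.empty
    -- {ck: grouped[ck] for ck in context_keys if ck in grouped}
    ["weather", "timeofday", "scene"].filterMap (fun ck =>
      (grouped.get? ck).map (fun m => (ck, pvDictOut m)))

-- ===== PRECONDITION & SPEC =====
-- Pre_ excludes only the inputs where A raises KeyError (and B does too): a non-empty
-- metadata_by_image with no 'failure_cases' key in results.
def Pre_analyze_contextual_patterns_py (results : List (String × List (String × List (List (String × List (String × String)))))) (metadata_by_image : List (String × List (String × String))) : Prop :=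
  metadata_by_image = [] ∨ "failure_cases" ∈ results.map Prod.fst
instance (results : List (String × List (String × List (List (String × List (String × String)))))) (metadata_by_image : List (String × List (String × String))) : Decidable (Pre_analyze_contextual_patterns_py results metadata_by_image) := by unfold Pre_analyze_contextual_patterns_py; infer_instance

def pvWitness_analyze_contextual_patterns_py : (List (String × List (String × List (List (String × List (String × String)))))) × (List (String × List (String × String))) :=
  ([("failure_cases", [("miss", [[("metadata", [("weather", "rainy")])]])])], [("img1", [])])

def Spec_analyze_contextual_patterns_py (results : List (String × List (String × List (List (String × List (String × String)))))) (metadata_by_image : List (String × List (String × String))) (out : List (String × List (String × List (String × Int)))) : Prop := out = analyze_contextual_patterns_py_alt results metadata_by_image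
instance (results : List (String × List (String × List (List (String × List (String × String)))))) (metadata_by_image : List (String × List (String × String))) (out : List (String × List (String × List (String × Int)))) : Decidable (Spec_analyze_contextual_patterns_py results metadata_by_image out) := by unfold Spec_analyze_contextual_patterns_py; infer_instance

-- ===== CLAIM (what is proved, stated in full; the proofs are below) =====
def Claim_equal_analyze_contextual_patterns_py : Prop := ∀ (results : List (String × List (String × List (List (String × List (String × String)))))) (metadata_by_image : List (String × List (String × String))), Dom_analyze_contextual_patterns_py results metadata_by_image → Pre_analyze_contextual_patterns_py results metadata_by_image → Spec_analyze_contextual_patterns_py results metadata_by_image (analyze_contextual_patterns_py results metadata_by_image)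

-- ===== LEMMAS AND PROOFS =====

-- the per-context-key flat list of (context_value, failure_type) pairs
def pvPairs (ck : String) (fc : List (String × List (List (String × List (String × String))))) :
    List (String × String) :=
  fc.flatMap (fun p => p.2.map (fun c => ((pvMeta c).getD ck "unknown", p.1)))

-- a fold of modify-at-key, read back at one key, is the fold of the matching entries
lemma pv_getD_foldl_modify {α δ : Type} (ps : List α) (key : α → String) (g : δ → α → δ)
    (d0 : δ) (d : PySem.Dict String δ) (k : String) :
    (ps.foldl (fun cf p => cf.modify (key p) d0 (fun i => g i p)) d).getD k d0
      = (ps.filter (fun p => key p == k)).foldl g (d.getD k d0) := by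
  induction ps generalizing d with
  | nil => rfl
  | cons p ps ih =>
    simp only [List.foldl_cons, List.filter_cons]
    by_cases h : key p = k
    all_goals have h' : (k = key p) ↔ (key p = k) := eq_comm
    all_goals rw [ih, PySem.Dict.getD_modify]
    · simp [h]
    · simp [h, h']

-- dedup commutes with filter
lemma pv_ofList_filter {α : Type} [BEq α] [LawfulBEq α] (l : List α) (p : α → Bool) :
    PySem.Set.ofList (l.filter p) = (PySem.Set.ofList l).filter p := by
  induction l with
  | nil => rfl
  | cons x xs ih =>
    by_cases h : p x
    · rw [List.filter_cons_of_pos h, PySem.Set.ofList_cons, PySem.Set.ofList_cons, ih,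
        List.filter_cons_of_pos h]
      congr 1
      show ((PySem.Set.ofList xs).filter p).filter (fun y => !(y == x))
          = ((PySem.Set.ofList xs).filter (fun y => !(y == x))).filter p
      simp only [List.filter_filter, Bool.and_comm]
    · rw [List.filter_cons_of_neg h, PySem.Set.ofList_cons, List.filter_cons_of_neg h, ih]
      show List.filter p (PySem.Set.ofList xs)
          = ((PySem.Set.ofList xs).filter (fun y => !(y == x))).filter p
      simp only [List.filter_filter]
      refine (List.filter_congr fun a _ => ?_).symm
      by_cases hax : a = x <;> simp [hax, h]

-- dedup commutes with an injective map
lemma pv_ofList_map_inj {α β : Type} [BEq α] [LawfulBEq α] [BEq β] [LawfulBEq β]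
    (l : List α) (f : α → β) (hf : Function.Injective f) :
    PySem.Set.ofList (l.map f) = (PySem.Set.ofList l).map f := by
  induction l using List.reverseRecOn with
  | nil => rfl
  | append_singleton xs x ih =>
    rw [List.map_append, List.map_singleton, PySem.Set.ofList_append_singleton,
      PySem.Set.ofList_append_singleton, ih]
    by_cases h : x ∈ PySem.Set.ofList xs
    · rw [PySem.Set.add_of_mem h, PySem.Set.add_of_mem (List.mem_map_of_mem h)]
    · rw [PySem.Set.add_of_not_mem h, PySem.Set.add_of_not_mem (by
        intro hm
        obtain ⟨a, ha, hfa⟩ := List.mem_map.mp hm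
        exact h (hf hfa ▸ ha)), List.map_append, List.map_singleton]

-- deduping again after mapping a deduped list is deduping the mapped original
lemma pv_ofList_map_ofList {α β : Type} [BEq α] [LawfulBEq α] [BEq β] [LawfulBEq β]
    (l : List α) (f : α → β) :
    PySem.Set.ofList ((PySem.Set.ofList l).map f) = PySem.Set.ofList (l.map f) := by
  induction l using List.reverseRecOn with
  | nil => rfl
  | append_singleton xs x ih =>
    rw [PySem.Set.ofList_append_singleton, List.map_append, List.map_singleton,
      PySem.Set.ofList_append_singleton, ← ih]
    by_cases h : x ∈ PySem.Set.ofList xs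
    · rw [PySem.Set.add_of_mem h, PySem.Set.add_of_mem]
      rw [PySem.Set.mem_ofList]
      exact List.mem_map_of_mem h
    · rw [PySem.Set.add_of_not_mem h, List.map_append, List.map_singleton,
        PySem.Set.ofList_append_singleton]

lemma pv_ofList_eq_nil_iff {α : Type} [BEq α] [LawfulBEq α] (l : List α) :
    PySem.Set.ofList l = [] ↔ l = [] := by
  cases l with
  | nil => simp
  | cons x xs => simp [PySem.Set.ofList_cons]

-- the triples with first component ck are exactly the per-ck pairs, tagged with ck
lemma pvTriples_filter (fc : List (String × List (List (String × List (String × String)))))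
    (ck : String) (hck : ck ∈ (["weather", "timeofday", "scene"] : List String)) :
    (pvTriples fc).filter (fun t => t.1 == ck)
      = (pvPairs ck fc).map (fun q => (ck, q.1, q.2)) := by
  unfold pvTriples pvPairs
  simp only [List.filter_flatMap, List.map_flatMap, List.map_map]
  congr 1
  funext p
  have hpt : ∀ c : List (String × List (String × String)),
      ((["weather", "timeofday", "scene"].map
          (fun k => (k, (pvMeta c).getD k "unknown", p.1))).filter (fun t => t.1 == ck))
        = [(ck, (pvMeta c).getD ck "unknown", p.1)] := by
    intro c
    simp only [List.mem_cons, List.not_mem_nil, or_false] at hck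
    rcases hck with rfl | rfl | rfl <;> simp [List.filter]
  simp only [hpt]
  rw [← List.map_eq_flatMap]
  rfl

lemma pvTriples_count (fc : List (String × List (List (String × List (String × String)))))
    (ck : String) (hck : ck ∈ (["weather", "timeofday", "scene"] : List String)) (cv ft : String) :
    (pvTriples fc).count (ck, cv, ft) = (pvPairs ck fc).count (cv, ft) := by
  have hinj : Function.Injective (fun q : String × String => (ck, q.1, q.2)) := by
    intro a b hab
    simpa [Prod.ext_iff] using hab
  rw [← List.count_filter (p := fun t : String × String × String => t.1 == ck) (by simp),
    pvTriples_filter fc ck hck,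
    show ((ck, cv, ft) : String × String × String)
        = (fun q : String × String => (ck, q.1, q.2)) (cv, ft) from rfl,
    List.count_map_of_injective _ _ hinj]

-- A's per-key nested loop, flattened to one fold over the pair list
lemma pvRunKey_eq (ck : String) (fc : List (String × List (List (String × List (String × String))))) :
    pvRunKey ck fc = (pvPairs ck fc).foldl
      (fun cf q => cf.modify q.1 PySem.Dict.empty (fun i => i.modify q.2 0 (· + 1)))
      PySem.Dict.empty := by
  unfold pvRunKey pvPairs pvCount
  simp only [List.foldl_flatMap, List.foldl_map]

-- canonical description of A's per-key dict
lemma pvRunKey_keys (ck : String) (fc : List (String × List (List (String × List (String × String))))) :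
    (pvRunKey ck fc).keys = PySem.Set.ofList ((pvPairs ck fc).map Prod.fst) := by
  rw [pvRunKey_eq,
    PySem.Dict.keys_foldl_modify_key (pvPairs ck fc) Prod.fst PySem.Dict.empty
      (fun _ q => fun i => i.modify q.2 0 (· + 1)) PySem.Dict.empty,
    PySem.Dict.keys_empty, PySem.Set.update_nil_left]

lemma pvRunKey_getD (ck : String) (fc : List (String × List (List (String × List (String × String)))))
    (cv : String) :
    (pvRunKey ck fc).getD cv PySem.Dict.empty
      = PySem.Dict.counter (((pvPairs ck fc).filter (fun q => q.1 == cv)).map Prod.snd) := by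
  have h := pv_getD_foldl_modify (pvPairs ck fc) Prod.fst
    (fun (i : PySem.Dict String Int) (q : String × String) => i.modify q.2 0 (· + 1))
    PySem.Dict.empty PySem.Dict.empty cv
  rw [pvRunKey_eq]
  refine Eq.trans h ?_
  rw [PySem.Dict.getD_empty, PySem.Dict.counter_eq_foldl, List.foldl_map]

-- B's grouped dict, at key ck
def pvGrouped (fc : List (String × List (List (String × List (String × String))))) :
    PySem.Dict String (PySem.Dict String (PySem.Dict String Int)) :=
  (PySem.Dict.counter (pvTriples fc)).items.foldl pvGroupStep PySem.Dict.empty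

lemma pvGrouped_getD_eq_fold (fc : List (String × List (List (String × List (String × String)))))
    (ck : String) (hck : ck ∈ (["weather", "timeofday", "scene"] : List String)) :
    (pvGrouped fc).getD ck PySem.Dict.empty
      = (PySem.Set.ofList (pvPairs ck fc)).foldl
          (fun m q => m.modify q.1 PySem.Dict.empty
            (fun i => i.insert q.2 ((pvPairs ck fc).count q : Int))) PySem.Dict.empty := by
  have hinj : Function.Injective (fun q : String × String => (ck, q.1, q.2)) := by
    intro a b hab
    simpa [Prod.ext_iff] using hab
  have h := pv_getD_foldl_modify (PySem.Dict.counter (pvTriples fc)).items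
    (fun q : (String × String × String) × Int => q.1.1)
    (fun (m : PySem.Dict String (PySem.Dict String Int)) (q : (String × String × String) × Int) =>
      m.modify q.1.2.1 PySem.Dict.empty (fun i => i.insert q.1.2.2 q.2))
    PySem.Dict.empty PySem.Dict.empty ck
  unfold pvGrouped pvGroupStep
  refine Eq.trans h ?_
  rw [PySem.Dict.getD_empty, PySem.Dict.items_counter, List.filter_map]
  simp only [Function.comp_def]
  rw [← pv_ofList_filter, pvTriples_filter fc ck hck, pv_ofList_map_inj _ _ hinj,
    List.foldl_map, List.foldl_map]
  simp only [pvTriples_count fc ck hck]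

lemma pvGrouped_getD_keys (fc : List (String × List (List (String × List (String × String)))))
    (ck : String) (hck : ck ∈ (["weather", "timeofday", "scene"] : List String)) :
    ((pvGrouped fc).getD ck PySem.Dict.empty).keys
      = PySem.Set.ofList ((pvPairs ck fc).map Prod.fst) := by
  rw [pvGrouped_getD_eq_fold fc ck hck,
    PySem.Dict.keys_foldl_modify_key (PySem.Set.ofList (pvPairs ck fc)) Prod.fst
      PySem.Dict.empty
      (fun _ q => fun i => i.insert q.2 ((pvPairs ck fc).count q : Int)) PySem.Dict.empty,
    PySem.Dict.keys_empty, PySem.Set.update_nil_left, pv_ofList_map_ofList]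

lemma pvGrouped_getD_getD (fc : List (String × List (List (String × List (String × String)))))
    (ck : String) (hck : ck ∈ (["weather", "timeofday", "scene"] : List String)) (cv : String) :
    ((pvGrouped fc).getD ck PySem.Dict.empty).getD cv PySem.Dict.empty
      = PySem.Dict.counter (((pvPairs ck fc).filter (fun q => q.1 == cv)).map Prod.snd) := by
  have h := pv_getD_foldl_modify (PySem.Set.ofList (pvPairs ck fc)) Prod.fst
    (fun (i : PySem.Dict String Int) (q : String × String) =>
      i.insert q.2 ((pvPairs ck fc).count q : Int))
    PySem.Dict.empty PySem.Dict.empty cv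
  rw [pvGrouped_getD_eq_fold fc ck hck]
  refine Eq.trans h ?_
  rw [PySem.Dict.getD_empty, ← pv_ofList_filter]
  -- every pair in the filtered list is (cv, its second component)
  have hfl : (pvPairs ck fc).filter (fun q => q.1 == cv)
      = (((pvPairs ck fc).filter (fun q => q.1 == cv)).map Prod.snd).map (fun t => (cv, t)) := by
    rw [List.map_map]
    symm
    refine Eq.trans (List.map_congr_left fun q hq => ?_) (List.map_id _)
    have h1 : q.1 = cv := by simpa using (List.mem_filter.mp hq).2
    simp [Function.comp, Prod.ext_iff, h1]
  have hinj2 : Function.Injective (fun t : String => (cv, t)) := by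
    intro a b hab
    simpa [Prod.ext_iff] using hab
  have hcnt : ∀ t : String, (pvPairs ck fc).count (cv, t)
      = (((pvPairs ck fc).filter (fun q => q.1 == cv)).map Prod.snd).count t := by
    intro t
    rw [← List.count_filter (p := fun q : String × String => q.1 == cv) (l := pvPairs ck fc)
        (by simp)]
    conv_lhs => rw [hfl]
    rw [show ((cv, t) : String × String) = (fun t : String => (cv, t)) t from rfl,
      List.count_map_of_injective _ _ hinj2]
  conv_lhs => rw [hfl]
  rw [pv_ofList_map_inj _ _ hinj2, List.foldl_map]
  simp only [hcnt]
  -- a fold inserting distinct fresh keys is the counter, item for item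
  apply PySem.Dict.ext
  rw [PySem.Dict.items_foldl_insert_fresh
      (PySem.Set.ofList (((pvPairs ck fc).filter (fun q => q.1 == cv)).map Prod.snd))
      (fun t => t) (fun t => ((((pvPairs ck fc).filter (fun q => q.1 == cv)).map Prod.snd).count t : Int))
      PySem.Dict.empty (fun a _ => PySem.Dict.contains_empty a)
      (by simp only [List.map_id_fun', id]; exact PySem.Set.nodup_ofList (((pvPairs ck fc).filter (fun q => q.1 == cv)).map Prod.snd)),
    PySem.Dict.items_counter]
  rfl

-- the two per-key dicts coincide
lemma pvMain (fc : List (String × List (List (String × List (String × String)))))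
    (ck : String) (hck : ck ∈ (["weather", "timeofday", "scene"] : List String)) :
    (pvGrouped fc).getD ck PySem.Dict.empty = pvRunKey ck fc := by
  have hndA : (pvRunKey ck fc).keys.Nodup := by
    rw [pvRunKey_keys]
    exact PySem.Set.nodup_ofList _
  have hndB : ((pvGrouped fc).getD ck PySem.Dict.empty).keys.Nodup := by
    rw [pvGrouped_getD_keys fc ck hck]
    exact PySem.Set.nodup_ofList _
  apply PySem.Dict.ext
  rw [PySem.Dict.items_eq_map_keys _ hndA PySem.Dict.empty,
    PySem.Dict.items_eq_map_keys _ hndB PySem.Dict.empty,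
    pvRunKey_keys, pvGrouped_getD_keys fc ck hck]
  exact (List.map_congr_left fun cv _ => by
    rw [pvRunKey_getD, pvGrouped_getD_getD fc ck hck]).symm

-- emission condition: ck is a key of grouped iff the per-ck pair list is non-empty
lemma pvGrouped_get? (fc : List (String × List (List (String × List (String × String)))))
    (ck : String) (hck : ck ∈ (["weather", "timeofday", "scene"] : List String)) :
    (pvGrouped fc).get? ck
      = if pvPairs ck fc = [] then none else some (pvRunKey ck fc) := by
  have hkeys : (pvGrouped fc).keys
      = PySem.Set.ofList ((PySem.Dict.counter (pvTriples fc)).items.map (fun q => q.1.1)) := by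
    unfold pvGrouped pvGroupStep
    rw [PySem.Dict.keys_foldl_modify_key (PySem.Dict.counter (pvTriples fc)).items
        (fun q : (String × String × String) × Int => q.1.1) PySem.Dict.empty
        (fun _ q => fun m => m.modify q.1.2.1 PySem.Dict.empty (fun i => i.insert q.1.2.2 q.2))
        PySem.Dict.empty,
      PySem.Dict.keys_empty, PySem.Set.update_nil_left]
  have hmem : ck ∈ (pvGrouped fc).keys ↔ pvPairs ck fc ≠ [] := by
    rw [hkeys, PySem.Set.mem_ofList, PySem.Dict.items_counter, List.map_map]
    constructor
    · intro hm
      obtain ⟨t, ht, hteq⟩ := List.mem_map.mp hm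
      have ht' : t ∈ pvTriples fc := (PySem.Set.mem_ofList _ _).mp ht
      intro hnil
      have : t ∈ (pvTriples fc).filter (fun t => t.1 == ck) := by
        have h1 : t.1 = ck := by simpa using hteq
        simp [List.mem_filter, ht', h1]
      rw [pvTriples_filter fc ck hck, hnil] at this
      simp at this
    · intro hne
      obtain ⟨q, hq⟩ := List.exists_mem_of_ne_nil _ hne
      have : (ck, q.1, q.2) ∈ (pvTriples fc).filter (fun t => t.1 == ck) := by
        rw [pvTriples_filter fc ck hck]
        exact List.mem_map.mpr ⟨q, hq, rfl⟩
      have ht := (List.mem_filter.mp this).1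
      exact List.mem_map.mpr ⟨(ck, q.1, q.2), (PySem.Set.mem_ofList _ _).mpr ht, rfl⟩
  by_cases hp : pvPairs ck fc = []
  · rw [if_pos hp, PySem.Dict.get?_eq_none_iff_contains]
    rw [← Bool.not_eq_true, PySem.Dict.contains_iff_mem_keys, hmem]
    simp [hp]
  · rw [if_neg hp]
    have hc : (pvGrouped fc).contains ck = true :=
      (PySem.Dict.contains_iff_mem_keys _ _).mpr (hmem.mpr hp)
    rw [PySem.Dict.contains_eq_isSome_get?] at hc
    obtain ⟨m, hm⟩ := Option.isSome_iff_exists.mp hc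
    have hgd := pvMain fc ck hck
    rw [PySem.Dict.getD_eq_get?_getD, hm, Option.getD_some] at hgd
    rw [hm, hgd]

lemma pvRunKey_isEmpty (ck : String) (fc : List (String × List (List (String × List (String × String))))) :
    (pvRunKey ck fc).items.isEmpty = decide (pvPairs ck fc = []) := by
  have hiff : ((pvRunKey ck fc).items = []) ↔ (pvPairs ck fc = []) := by
    constructor
    · intro hi
      have hk : (pvRunKey ck fc).keys = [] := by
        simp only [PySem.Dict.keys, hi, List.map_nil]
      rw [pvRunKey_keys, pv_ofList_eq_nil_iff, List.map_eq_nil_iff] at hk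
      exact hk
    · intro hp
      have : (pvRunKey ck fc) = PySem.Dict.empty := by
        rw [pvRunKey_eq, hp]
        rfl
      rw [this]
      rfl
  by_cases hp : pvPairs ck fc = [] <;> simp [List.isEmpty_iff, hiff, hp]

-- ===== VERDICT (by name: the statement is the Claim_ definition above) =====
theorem analyze_contextual_patterns_py_spec : Claim_equal_analyze_contextual_patterns_py := by
  intro results metadata_by_image _ _
  unfold Spec_analyze_contextual_patterns_py
  unfold analyze_contextual_patterns_py analyze_contextual_patterns_py_alt
  by_cases h : metadata_by_image.isEmpty
  · simp [h]
  · simp only [h, Bool.false_eq_true, if_false]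
    have hw := pvGrouped_get? ((PySem.Dict.ofList ((PySem.Dict.ofList results).getD "failure_cases" [])).items) "weather" (by simp)
    have ht := pvGrouped_get? ((PySem.Dict.ofList ((PySem.Dict.ofList results).getD "failure_cases" [])).items) "timeofday" (by simp)
    have hs := pvGrouped_get? ((PySem.Dict.ofList ((PySem.Dict.ofList results).getD "failure_cases" [])).items) "scene" (by simp)
    unfold pvGrouped at hw ht hs
    have ew := pvRunKey_isEmpty "weather" ((PySem.Dict.ofList ((PySem.Dict.ofList results).getD "failure_cases" [])).items)
    have et := pvRunKey_isEmpty "timeofday" ((PySem.Dict.ofList ((PySem.Dict.ofList results).getD "failure_cases" [])).items)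
    have es := pvRunKey_isEmpty "scene" ((PySem.Dict.ofList ((PySem.Dict.ofList results).getD "failure_cases" [])).items)
    simp only [List.foldl_cons, List.foldl_nil, List.filterMap_cons, List.filterMap_nil]
    by_cases h1 : pvPairs "weather" ((PySem.Dict.ofList ((PySem.Dict.ofList results).getD "failure_cases" [])).items) = [] <;>
      by_cases h2 : pvPairs "timeofday" ((PySem.Dict.ofList ((PySem.Dict.ofList results).getD "failure_cases" [])).items) = [] <;>
        by_cases h3 : pvPairs "scene" ((PySem.Dict.ofList ((PySem.Dict.ofList results).getD "failure_cases" [])).items) = [] <;>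
          simp [hw, ht, hs, ew, et, es, h1, h2, h3]
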